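-- pv_equiv track=rewrite | github.com/adihebbalae/Multi-Camera | meva/scripts/v10/person_descriptions.py | _colors_similar
-- ===== SOURCE A (Python) =====
-- _COLOR_GROUPS = {
--     "black": {"black", "charcoal", "dark"},
--     "dark_gray": {"charcoal", "dark gray", "dark"},
--     "gray": {"gray", "grey", "silver", "dark gray"},
--     "white": {"white", "ivory", "light"},
--     "red": {"red", "crimson", "maroon", "rust"},
--     "orange": {"orange", "rust"},
--     "yellow": {"yellow", "gold", "khaki"},
--     "green": {"green", "olive", "teal"},
--     "blue": {"blue", "navy", "indigo", "teal"},
--     "purple": {"purple", "plum", "indigo", "mauve"},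
--     "pink": {"pink", "mauve"},
--     "brown": {"brown", "khaki", "beige"},
--     "beige": {"beige", "khaki", "ivory"},
--     "navy": {"navy", "blue", "dark blue", "indigo"},
--     "olive": {"olive", "green", "khaki"},
-- }
--
-- def _normalize_color(color: str) -> str:
--     """Normalize a color string for matching (lowercase, strip prefixes)."""
--     if not color:
--         return ""
--     color = color.lower().strip()
--     # Strip 'dark ' / 'light ' prefixes for fuzzy matching
--     for prefix in ("dark ", "light ", "bright "):
--         if color.startswith(prefix):
--             return color[len(prefix):]
--     return color
--
-- def _colors_similar(color_a: str, color_b: str) -> bool: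
--     """Check if two color names are semantically similar."""
--     a = _normalize_color(color_a)
--     b = _normalize_color(color_b)
--     if not a or not b:
--         return False
--     if a == b:
--         return True
--     # Check if they share a color group
--     for group_colors in _COLOR_GROUPS.values():
--         if a in group_colors and b in group_colors:
--             return True
--     return False
-- ===== SOURCE B (Python) =====
-- _COLOR_GROUPS = {
--     "black": {"black", "charcoal", "dark"},
--     "dark_gray": {"charcoal", "dark gray", "dark"},
--     "gray": {"gray", "grey", "silver", "dark gray"},
--     "white": {"white", "ivory", "light"},
--     "red": {"red", "crimson", "maroon", "rust"},
--     "orange": {"orange", "rust"},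
--     "yellow": {"yellow", "gold", "khaki"},
--     "green": {"green", "olive", "teal"},
--     "blue": {"blue", "navy", "indigo", "teal"},
--     "purple": {"purple", "plum", "indigo", "mauve"},
--     "pink": {"pink", "mauve"},
--     "brown": {"brown", "khaki", "beige"},
--     "beige": {"beige", "khaki", "ivory"},
--     "navy": {"navy", "blue", "dark blue", "indigo"},
--     "olive": {"olive", "green", "khaki"},
-- }
--
-- # Flat symmetric relation, built once at module load: all ordered pairs of
-- # colors that co-occur in some group.
-- _SIMILAR_PAIRS = {
--     (x, y)
--     for colors in _COLOR_GROUPS.values()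
--     for x in colors
--     for y in colors
-- }
--
-- _PREFIXES = ("dark ", "light ", "bright ")
--
--
-- def _normalize_color(color: str) -> str:
--     """Normalize a color string for matching (lowercase, strip prefixes)."""
--     c = color.lower().strip()
--     return next((c[len(p):] for p in _PREFIXES if c.startswith(p)), c)
--
--
-- def _colors_similar(color_a: str, color_b: str) -> bool:
--     """Check if two color names are semantically similar."""
--     a = _normalize_color(color_a)
--     b = _normalize_color(color_b)
--     return bool(a) and bool(b) and (a == b or (a, b) in _SIMILAR_PAIRS)
-- ===== Notes on version B (the rewrite author's own statement) =====
-- stated objective: alternative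
-- what changed: Replaced the per-call scan over all 15 color groups with a flat symmetric pair relation (set of all co-occurring color-name pairs) precomputed once at module load, so the call is one set-membership test; the branchy if-chain and prefix loop become a single boolean expression and a generator-based prefix strip.
import Mathlib
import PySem

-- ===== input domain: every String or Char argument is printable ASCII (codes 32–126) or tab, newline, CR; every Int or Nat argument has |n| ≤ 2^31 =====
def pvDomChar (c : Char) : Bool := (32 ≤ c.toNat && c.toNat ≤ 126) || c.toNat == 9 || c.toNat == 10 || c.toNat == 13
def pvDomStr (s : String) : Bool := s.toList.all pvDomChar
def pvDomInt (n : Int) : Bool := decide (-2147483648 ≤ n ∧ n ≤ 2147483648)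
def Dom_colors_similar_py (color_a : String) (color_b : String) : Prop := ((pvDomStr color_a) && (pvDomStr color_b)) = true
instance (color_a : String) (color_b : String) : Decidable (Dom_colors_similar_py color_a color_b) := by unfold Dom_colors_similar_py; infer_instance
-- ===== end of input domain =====

-- B replaces A's per-call scan over the 15 color groups with a precomputed flat set of
-- all co-occurring (x, y) color-name pairs, tested by one membership lookup (objective: alternative).

-- ===== PORT A =====
-- _COLOR_GROUPS: dict of sets; group values as lists of distinct names in written order
def pvColorGroups : List (String × List String) :=
  [ ("black", ["black", "charcoal", "dark"]),
    ("dark_gray", ["charcoal", "dark gray", "dark"]),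
    ("gray", ["gray", "grey", "silver", "dark gray"]),
    ("white", ["white", "ivory", "light"]),
    ("red", ["red", "crimson", "maroon", "rust"]),
    ("orange", ["orange", "rust"]),
    ("yellow", ["yellow", "gold", "khaki"]),
    ("green", ["green", "olive", "teal"]),
    ("blue", ["blue", "navy", "indigo", "teal"]),
    ("purple", ["purple", "plum", "indigo", "mauve"]),
    ("pink", ["pink", "mauve"]),
    ("brown", ["brown", "khaki", "beige"]),
    ("beige", ["beige", "khaki", "ivory"]),
    ("navy", ["navy", "blue", "dark blue", "indigo"]),
    ("olive", ["olive", "green", "khaki"]) ]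

-- A's _normalize_color: early return on "", then lowercase+strip, then an if-chain of prefixes
def pvNormalizeColor (color : String) : String :=
  if color = "" then ""
  else
    let c := PySem.Str.strip (PySem.Str.lower color)
    if PySem.Str.startswith c "dark " then PySem.Str.slice c (some 5) none
    else if PySem.Str.startswith c "light " then PySem.Str.slice c (some 6) none
    else if PySem.Str.startswith c "bright " then PySem.Str.slice c (some 7) none
    else c

-- the 'for group_colors in _COLOR_GROUPS.values(): if a in ... and b in ...: return True / return False' loop
def pvShareGroup (a : String) (b : String) : Bool :=
  pvColorGroups.any (fun g => g.2.contains a && g.2.contains b)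

def colors_similar_py (color_a : String) (color_b : String) : Bool :=
  if pvNormalizeColor color_a = "" || pvNormalizeColor color_b = "" then false
  else if pvNormalizeColor color_a = pvNormalizeColor color_b then true
  else pvShareGroup (pvNormalizeColor color_a) (pvNormalizeColor color_b)

-- ===== PORT B =====
-- _SIMILAR_PAIRS: the set comprehension over groups × colors × colors, built once at load
def pvSimilarPairs : PySem.Set (String × String) :=
  PySem.Set.ofList
    (pvColorGroups.flatMap (fun g => g.2.flatMap (fun x => g.2.map (fun y => (x, y)))))

def pvPrefixes : List String := ["dark ", "light ", "bright "]

-- B's _normalize_color: lowercase+strip, then the first matching prefix from _PREFIXES is cut off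
def pvNorm (color : String) : String :=
  let c := PySem.Str.strip (PySem.Str.lower color)
  match pvPrefixes.find? (fun p => PySem.Str.startswith c p) with
  | some p => PySem.Str.slice c (some (PySem.Str.len p)) none
  | none => c

-- 'bool(a) and bool(b) and (a == b or (a, b) in _SIMILAR_PAIRS)' as one boolean expression
def colors_similar_py_alt (color_a : String) (color_b : String) : Bool :=
  let a := pvNorm color_a
  let b := pvNorm color_b
  a != "" && b != "" && (a == b || PySem.Set.contains pvSimilarPairs (a, b))

-- ===== PRECONDITION & SPEC =====
def Spec_colors_similar_py (color_a : String) (color_b : String) (out : Bool) : Prop := out = colors_similar_py_alt color_a color_b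
instance (color_a : String) (color_b : String) (out : Bool) : Decidable (Spec_colors_similar_py color_a color_b out) := by unfold Spec_colors_similar_py; infer_instance

-- ===== CLAIM (what is proved, stated in full; the proofs are below) =====
def Claim_equal_colors_similar_py : Prop := ∀ (color_a : String) (color_b : String), Dom_colors_similar_py color_a color_b → Spec_colors_similar_py color_a color_b (colors_similar_py color_a color_b)

-- ===== LEMMAS AND PROOFS =====
set_option maxRecDepth 10000

-- the two normalizations agree on every string
lemma pv_norm_eq (color : String) : pvNormalizeColor color = pvNorm color := by
  by_cases h0 : color = ""
  · subst h0; decide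
  · simp only [pvNormalizeColor, pvNorm, pvPrefixes, h0, if_false, PySem.Str.startswith,
      PySem.Str.strip, PySem.Str.lower]
    split_ifs with h1 h2 h3 <;>
      simp_all [List.find?, PySem.Str.len]

-- the 31 color names occurring in some group
def pvNames : List String :=
  ["black", "charcoal", "dark", "dark gray", "gray", "grey", "silver", "white",
   "ivory", "light", "red", "crimson", "maroon", "rust", "orange", "yellow",
   "gold", "khaki", "green", "olive", "teal", "blue", "navy", "indigo",
   "purple", "plum", "mauve", "pink", "brown", "beige", "dark blue"]

lemma pv_groups_sub : pvColorGroups.all (fun g => g.2.all (fun x => pvNames.contains x)) = true := by decide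

lemma pv_pairs_sub : pvSimilarPairs.all (fun p => pvNames.contains p.1 && pvNames.contains p.2) = true := by decide

lemma pv_share_false {a b : String} (h : a ∉ pvNames ∨ b ∉ pvNames) :
    pvShareGroup a b = false := by
  unfold pvShareGroup
  rw [List.any_eq_false]
  intro g hg
  simp only [Bool.and_eq_true, not_and]
  intro hca hcb
  have hall := List.all_eq_true.mp (List.all_eq_true.mp pv_groups_sub g hg)
  rcases h with h | h
  · exact absurd (by simpa using hall a (by simpa using hca)) h
  · exact absurd (by simpa using hall b (by simpa using hcb)) h

lemma pv_pairs_false {a b : String} (h : a ∉ pvNames ∨ b ∉ pvNames) :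
    PySem.Set.contains pvSimilarPairs (a, b) = false := by
  rw [Bool.eq_false_iff]
  intro hc
  have hmem : (a, b) ∈ pvSimilarPairs := by
    simpa [PySem.Set.contains] using hc
  have := List.all_eq_true.mp pv_pairs_sub _ hmem
  simp only [Bool.and_eq_true, List.contains_eq_mem, decide_eq_true_eq] at this
  rcases h with h | h
  · exact h this.1
  · exact h this.2

lemma pv_core_mem : ∀ a ∈ pvNames, ∀ b ∈ pvNames,
    pvShareGroup a b = PySem.Set.contains pvSimilarPairs (a, b) := by decide

lemma pv_core_eq (a b : String) :
    pvShareGroup a b = PySem.Set.contains pvSimilarPairs (a, b) := by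
  by_cases ha : a ∈ pvNames
  · by_cases hb : b ∈ pvNames
    · exact pv_core_mem a ha b hb
    · rw [pv_share_false (Or.inr hb), pv_pairs_false (Or.inr hb)]
  · rw [pv_share_false (Or.inl ha), pv_pairs_false (Or.inl ha)]

-- the if-chain and the single boolean expression agree for any tail value m
lemma pv_bool (a b : String) (m : Bool) :
    (if a = "" || b = "" then false else if a = b then true else m)
      = (a != "" && b != "" && (a == b || m)) := by
  by_cases ha : a = "" <;> by_cases hb : b = "" <;> by_cases hab : a = b <;>
    first
      | (rw [bne, bne, beq_eq_false_iff_ne.mpr ha, beq_eq_false_iff_ne.mpr hb,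
             beq_eq_false_iff_ne.mpr hab]; simp [ha, hb, hab])
      | simp [ha, hb, hab]

-- ===== VERDICT (by name: the statement is the Claim_ definition above) =====
theorem colors_similar_py_spec : Claim_equal_colors_similar_py := by
  intro color_a color_b _
  unfold Spec_colors_similar_py
  simp only [colors_similar_py, colors_similar_py_alt, pv_norm_eq, pv_core_eq]
  exact pv_bool (pvNorm color_a) (pvNorm color_b) _
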